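-- pv_equiv track=rewrite | github.com/Berat03/quantumScheduling | new/workingCode/linearApprox.py | performAction
-- ===== SOURCE A (Python) =====
-- def performAction(action, augmented_state):
--     consumed_edges, goal_edge = action
--     ent_state, edr_bins = augmented_state
--     new_state = list(ent_state)
--     for edge_to_consume in consumed_edges:
--         for i, (edge, age) in enumerate(new_state):
--             if edge == edge_to_consume:
--                 new_state[i] = (edge, -1)
--                 break
--     return (tuple(new_state), edr_bins)
-- ===== SOURCE B (Python) =====
-- def performAction(action, augmented_state):
--     consumed_edges, goal_edge = action
--     ent_state, edr_bins = augmented_state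
--     cset = set(consumed_edges)
--     new_state = tuple(
--         (edge, -1) if edge in cset and all(e2 != edge for e2, _ in ent_state[:i])
--         else (edge, age)
--         for i, (edge, age) in enumerate(ent_state)
--     )
--     return (new_state, edr_bins)
-- ===== Notes on version B (the rewrite author's own statement) =====
-- stated objective: alternative
-- what changed: Replaced A's mutation of a copied list via nested scans (one inner scan per consumed edge, with break) by a pure per-element rule: a single comprehension over enumerate(ent_state) that marks an entry -1 iff its edge is consumed and does not occur earlier in the state.
import Mathlib
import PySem

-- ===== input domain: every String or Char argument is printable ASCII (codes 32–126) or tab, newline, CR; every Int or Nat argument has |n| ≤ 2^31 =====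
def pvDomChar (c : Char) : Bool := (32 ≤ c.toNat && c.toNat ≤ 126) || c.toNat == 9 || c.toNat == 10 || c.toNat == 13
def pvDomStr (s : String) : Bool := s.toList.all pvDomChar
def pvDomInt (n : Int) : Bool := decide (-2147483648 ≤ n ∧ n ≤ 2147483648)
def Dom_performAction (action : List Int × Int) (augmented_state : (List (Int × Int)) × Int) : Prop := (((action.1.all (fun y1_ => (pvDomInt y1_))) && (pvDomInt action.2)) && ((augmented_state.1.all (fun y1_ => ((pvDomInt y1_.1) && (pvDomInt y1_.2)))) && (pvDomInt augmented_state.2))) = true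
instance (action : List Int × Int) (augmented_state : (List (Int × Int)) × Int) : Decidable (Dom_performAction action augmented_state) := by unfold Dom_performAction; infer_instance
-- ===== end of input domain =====

-- B replaces A's nested in-place marking loops by a pure per-element rule (a single
-- comprehension: mark -1 iff the edge is consumed and has no earlier occurrence);
-- same return value, different decomposition, no speed claim.

-- ===== PORT A =====
-- inner loop: 'for i, (edge, age) in enumerate(new_state): if edge == edge_to_consume: new_state[i] = (edge, -1); break'
def markFirst : List (Int × Int) → Int → List (Int × Int)
  | [], _ => []
  | (edge, age) :: rest, e =>
    if edge = e then (edge, -1) :: rest else (edge, age) :: markFirst rest e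

def performAction (action : List Int × Int) (augmented_state : (List (Int × Int)) × Int) : (List (Int × Int)) × Int :=
  (action.1.foldl markFirst augmented_state.1, augmented_state.2)

-- ===== PORT B =====
-- comprehension over enumerate(ent_state): (edge,-1) if edge in cset and
-- all(e2 != edge for e2,_ in ent_state[:i]) else (edge, age)
def performAction_alt (action : List Int × Int) (augmented_state : (List (Int × Int)) × Int) : (List (Int × Int)) × Int :=
  let cset := PySem.Set.ofList action.1
  ((PySem.List.enumerate augmented_state.1 0).map (fun p =>
      if PySem.Set.contains cset p.2.1 &&
         (PySem.List.slice augmented_state.1 none (some p.1)).all (fun q => q.1 != p.2.1)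
      then (p.2.1, -1) else p.2),
   augmented_state.2)

-- ===== PRECONDITION & SPEC =====
def Spec_performAction (action : List Int × Int) (augmented_state : (List (Int × Int)) × Int) (out : (List (Int × Int)) × Int) : Prop := out = performAction_alt action augmented_state
instance (action : List Int × Int) (augmented_state : (List (Int × Int)) × Int) (out : (List (Int × Int)) × Int) : Decidable (Spec_performAction action augmented_state out) := by unfold Spec_performAction; infer_instance

-- ===== CLAIM (what is proved, stated in full; the proofs are below) =====
def Claim_equal_performAction : Prop := ∀ (action : List Int × Int) (augmented_state : (List (Int × Int)) × Int), Dom_performAction action augmented_state → Spec_performAction action augmented_state (performAction action augmented_state)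

-- ===== LEMMAS AND PROOFS =====

-- proof-side intermediate: one pass carrying the set of not-yet-marked consumed edges
def markPass : PySem.Set Int → List (Int × Int) → List (Int × Int)
  | _, [] => []
  | r, (edge, age) :: rest =>
    if PySem.Set.contains r edge then
      (edge, -1) :: markPass (PySem.Set.discard r edge) rest
    else
      (edge, age) :: markPass r rest

-- markPass only looks at the MEMBERSHIP of its set argument
theorem markPass_congr (s : List (Int × Int)) (r r' : PySem.Set Int)
    (h : ∀ x, x ∈ r ↔ x ∈ r') : markPass r s = markPass r' s := by
  induction s generalizing r r' with
  | nil => rfl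
  | cons p rest ih =>
    obtain ⟨edge, age⟩ := p
    by_cases hc : edge ∈ r
    · have hc' : edge ∈ r' := (h edge).mp hc
      simp only [markPass, PySem.Set.contains_iff, hc, hc', if_true]
      exact congrArg _ (ih _ _ (fun x => by simp only [PySem.Set.mem_discard, h x]))
    · have hc' : edge ∉ r' := fun hx => hc ((h edge).mpr hx)
      simp only [markPass, PySem.Set.contains_iff, hc, hc', if_false]
      exact congrArg _ (ih _ _ h)

-- one A-step absorbed: marking e first, then sweeping with r, = sweeping with r ∪ {e}
theorem markPass_markFirst (s : List (Int × Int)) (r : PySem.Set Int) (e : Int) :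
    markPass r (markFirst s e) = markPass (PySem.Set.add r e) s := by
  induction s generalizing r with
  | nil => rfl
  | cons p rest ih =>
    obtain ⟨edge, age⟩ := p
    by_cases he : edge = e
    · subst he
      by_cases hc : edge ∈ r
      · simp only [markFirst, markPass, PySem.Set.contains_iff, hc,
          PySem.Set.mem_add, true_or, if_true]
        refine congrArg _ (markPass_congr _ _ _ (fun x => ?_))
        simp only [PySem.Set.mem_discard, PySem.Set.mem_add]
        tauto
      · simp only [markFirst, markPass, PySem.Set.contains_iff, hc,
          PySem.Set.mem_add, if_false, or_true, if_true]
        refine congrArg _ (markPass_congr _ _ _ (fun x => ?_))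
        simp only [PySem.Set.mem_discard, PySem.Set.mem_add]
        constructor
        · intro hx; exact ⟨Or.inl hx, fun hxe => hc (hxe ▸ hx)⟩
        · rintro ⟨hx | rfl, hne⟩
          · exact hx
          · exact absurd rfl hne
    · by_cases hc : edge ∈ r
      · simp only [markFirst, if_neg he, markPass, PySem.Set.contains_iff, hc,
          PySem.Set.mem_add, true_or, if_true, ih]
        refine congrArg _ (markPass_congr _ _ _ (fun x => ?_))
        simp only [PySem.Set.mem_discard, PySem.Set.mem_add]
        constructor
        · rintro (⟨hx, hne⟩ | rfl)
          · exact ⟨Or.inl hx, hne⟩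
          · exact ⟨Or.inr rfl, fun hxe => he hxe.symm⟩
        · rintro ⟨hx | rfl, hne⟩
          · exact Or.inl ⟨hx, hne⟩
          · exact Or.inr rfl
      · have hc' : ¬ (edge ∈ r ∨ edge = e) := by
          rintro (hx | hx)
          · exact hc hx
          · exact he hx
        simp only [markFirst, markPass, PySem.Set.contains_iff, hc,
          PySem.Set.mem_add, false_or, he, if_false, ih]

theorem markPass_empty (s : List (Int × Int)) : markPass ([] : PySem.Set Int) s = s := by
  induction s with
  | nil => rfl
  | cons p rest ih =>
    obtain ⟨edge, age⟩ := p
    simp [markPass, ih]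

-- A's foldl of inner scans = one sweep with the set of consumed edges
theorem foldl_markFirst_eq (es : List Int) (s : List (Int × Int)) :
    es.foldl markFirst s = markPass (PySem.Set.ofList es) s := by
  induction es generalizing s with
  | nil => simpa using (markPass_empty s).symm
  | cons e es' ih =>
    simp only [List.foldl_cons, ih, markPass_markFirst]
    refine markPass_congr _ _ _ (fun x => ?_)
    simp only [PySem.Set.mem_add, PySem.Set.mem_ofList, List.mem_cons]
    tauto

-- one sweep = the pure per-element rule, stated over the edge list with a prefix accumulator
theorem markPass_eq_map (r0 : PySem.Set Int) (s : List (Int × Int))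
    (pre : List Int) (r : PySem.Set Int)
    (hr : ∀ x, x ∈ r ↔ x ∈ r0 ∧ x ∉ pre) :
    markPass r s
      = (PySem.List.enumerate s (pre.length : Int)).map (fun p =>
          if PySem.Set.contains r0 p.2.1 &&
             ((pre ++ s.map Prod.fst).take p.1.toNat).all (fun x => x != p.2.1)
          then (p.2.1, -1) else p.2) := by
  induction s generalizing r pre with
  | nil => simp [PySem.List.enumerate_nil, markPass]
  | cons hd rest ih =>
    obtain ⟨e, a⟩ := hd
    rw [PySem.List.enumerate_cons, List.map_cons]
    have hpre : ((pre ++ ((e, a) :: rest).map Prod.fst).take ((pre.length : Int)).toNat) = pre := by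
      simp
    have hcond : ((PySem.Set.contains r0 e &&
        ((pre ++ ((e, a) :: rest).map Prod.fst).take ((pre.length : Int)).toNat).all
          (fun x => x != e)) = true) ↔ e ∈ r := by
      rw [hpre, hr]
      simp only [Bool.and_eq_true, PySem.Set.contains_iff, List.all_eq_true, bne_iff_ne,
        ne_eq]
      constructor
      · rintro ⟨h1, h2⟩; exact ⟨h1, fun he => h2 e he rfl⟩
      · rintro ⟨h1, h2⟩; exact ⟨h1, fun x hx hxe => h2 (hxe ▸ hx)⟩
    have hlist : ∀ (l : List Int), pre ++ e :: l = (pre ++ [e]) ++ l := by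
      intro l; simp
    have hlen : (pre.length : Int) + 1 = (((pre ++ [e]).length : Nat) : Int) := by
      simp
    by_cases hce : e ∈ r
    · have hb := hcond.mpr hce
      simp only [markPass, PySem.Set.contains_iff, hce, if_true]
      refine List.cons_eq_cons.mpr ⟨(if_pos hb).symm, ?_⟩
      rw [hlen, ih (pre ++ [e]) (PySem.Set.discard r e) (fun x => by
        simp only [PySem.Set.mem_discard, hr, List.mem_append, List.mem_singleton]
        tauto)]
      refine List.map_congr_left (fun p _ => ?_)
      simp only [List.map_cons, hlist (rest.map Prod.fst)]
    · have hb : ¬ ((PySem.Set.contains r0 e &&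
          ((pre ++ ((e, a) :: rest).map Prod.fst).take ((pre.length : Int)).toNat).all
            (fun x => x != e)) = true) := fun h => hce (hcond.mp h)
      simp only [markPass, PySem.Set.contains_iff, hce, if_false]
      refine List.cons_eq_cons.mpr ⟨(if_neg hb).symm, ?_⟩
      rw [hlen, ih (pre ++ [e]) r (fun x => by
        simp only [hr, List.mem_append, List.mem_singleton]
        constructor
        · rintro ⟨h1, h2⟩
          refine ⟨h1, ?_⟩
          rintro (hx | rfl)
          · exact h2 hx
          · exact hce ((hr x).mpr ⟨h1, h2⟩)
        · rintro ⟨h1, h2⟩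
          exact ⟨h1, fun hx => h2 (Or.inl hx)⟩)]
      refine List.map_congr_left (fun p _ => ?_)
      simp only [List.map_cons, hlist (rest.map Prod.fst)]

theorem performAction_alt_eq (action : List Int × Int) (aug : (List (Int × Int)) × Int) :
    performAction_alt action aug = (markPass (PySem.Set.ofList action.1) aug.1, aug.2) := by
  unfold performAction_alt
  refine Prod.ext ?_ rfl
  rw [markPass_eq_map (PySem.Set.ofList action.1) aug.1 [] _ (fun x => by simp)]
  simp only [List.length_nil, Nat.cast_zero, List.nil_append]
  refine (List.map_congr_left (fun p hp => ?_)).symm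
  obtain ⟨k, hk, rfl⟩ := (PySem.List.mem_enumerate_iff _ _ _).mp hp
  simp only [zero_add]
  rw [PySem.List.slice_to_natCast]
  rw [← List.map_take, List.all_map]
  rfl

-- ===== VERDICT (by name: the statement is the Claim_ definition above) =====
theorem performAction_spec : Claim_equal_performAction := by
  intro action augmented_state _
  unfold Spec_performAction performAction
  rw [performAction_alt_eq, foldl_markFirst_eq]
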